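-- pv_equiv track=rewrite | github.com/Harry-Chen/permutation-generator | intermediate_number.py | from_natural
-- ===== SOURCE A (Python) =====
-- from typing import List, ClassVar, Union
--
-- def from_natural(natural: int) -> List[int]:
--     assert natural > 0
--     i, fac = 1, 1
--     while fac <= natural:
--         i += 1
--         fac *= i
--     fac //= i
--     i -= 1
--     numbers = []
--     while i > 0:
--         numbers.append(natural // fac)
--         natural %= fac
--         fac //= i
--         i -= 1
--     return numbers
-- ===== SOURCE B (Python) =====
-- def from_natural(natural: int) -> list:
--     assert natural > 0
--     digits = []
--     i = 2
--     while natural > 0: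
--         digits.append(natural % i)
--         natural //= i
--         i += 1
--     digits.reverse()
--     return digits
-- ===== Notes on version B (the rewrite author's own statement) =====
-- stated objective: simpler
-- what changed: Bottom-up factoradic conversion: repeatedly append natural mod an increasing counter and floor-divide natural by it, then reverse, instead of A's initial factorial-sizing pass followed by top-down division by decreasing factorials.
import Mathlib
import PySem

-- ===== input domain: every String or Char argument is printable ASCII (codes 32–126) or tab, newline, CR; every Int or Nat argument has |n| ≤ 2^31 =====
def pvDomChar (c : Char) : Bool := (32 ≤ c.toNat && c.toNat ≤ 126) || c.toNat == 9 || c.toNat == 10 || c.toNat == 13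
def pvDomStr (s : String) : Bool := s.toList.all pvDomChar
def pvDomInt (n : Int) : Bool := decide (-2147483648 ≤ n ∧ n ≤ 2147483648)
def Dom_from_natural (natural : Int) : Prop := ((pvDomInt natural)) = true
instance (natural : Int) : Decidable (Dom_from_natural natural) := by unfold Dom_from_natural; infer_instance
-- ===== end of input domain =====

-- B converts to the factorial number system bottom-up (repeated mod / floor-division by an
-- increasing counter, then reverse) instead of A's factorial-sizing pass followed by top-down
-- division by decreasing factorials; objective: simpler.
-- The loops are ported with a fuel argument that only makes them total; the fuel supplied at the
-- call sites is proved sufficient on every admitted input (the loops exit on their own condition).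

-- ===== PORT A =====
-- first while loop: while fac <= natural: i += 1; fac *= i
def from_natural_loop1 : Nat → Int → Int → Int → Int × Int
  | 0, _, i, fac => (i, fac)
  | fuel + 1, natural, i, fac =>
    if fac ≤ natural then from_natural_loop1 fuel natural (i + 1) (fac * (i + 1)) else (i, fac)

-- second while loop: while i > 0: numbers.append(natural // fac); natural %= fac; fac //= i; i -= 1
def from_natural_loop2 : Nat → Int → Int → Int → List Int
  | 0, _, _, _ => []
  | fuel + 1, i, fac, natural =>
    if 0 < i then
      PySem.Int.floordiv natural fac ::
        from_natural_loop2 fuel (i - 1) (PySem.Int.floordiv fac i) (PySem.Int.mod natural fac)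
    else []

def from_natural (natural : Int) : List Int :=
  let p := from_natural_loop1 (natural.toNat + 1) natural 1 1
  from_natural_loop2 (p.1 - 1).toNat (p.1 - 1) (PySem.Int.floordiv p.2 p.1) natural

-- ===== PORT B =====
-- while natural > 0: digits.append(natural % i); natural //= i; i += 1
def from_natural_alt_loop : Nat → Int → Int → List Int
  | 0, _, _ => []
  | fuel + 1, natural, i =>
    if 0 < natural then
      PySem.Int.mod natural i :: from_natural_alt_loop fuel (PySem.Int.floordiv natural i) (i + 1)
    else []

def from_natural_alt (natural : Int) : List Int :=
  (from_natural_alt_loop (natural.toNat + 1) natural 2).reverse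

-- ===== PRECONDITION & SPEC =====
-- Python A has 'assert natural > 0': it raises AssertionError on natural ≤ 0, so Pre_ excludes those.
def Pre_from_natural (natural : Int) : Prop := 0 < natural
instance (natural : Int) : Decidable (Pre_from_natural natural) := by unfold Pre_from_natural; infer_instance
def pvWitness_from_natural : Int := (5)

def Spec_from_natural (natural : Int) (out : List Int) : Prop := out = from_natural_alt natural
instance (natural : Int) (out : List Int) : Decidable (Spec_from_natural natural out) := by unfold Spec_from_natural; infer_instance

-- ===== CLAIM (what is proved, stated in full; the proofs are below) =====
def Claim_equal_from_natural : Prop := ∀ (natural : Int), Dom_from_natural natural → Pre_from_natural natural → Spec_from_natural natural (from_natural natural)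

-- ===== LEMMAS AND PROOFS =====

-- product j * (j+1) * … * (j+k-1), so pvProdRange 2 k = (k+1)!
def pvProdRange : Int → Nat → Int
  | _, 0 => 1
  | j, k + 1 => j * pvProdRange (j + 1) k

-- top-down factorial digits, k positions, most significant first
def pvTD : Nat → Int → List Int
  | 0, _ => []
  | k + 1, n => n / pvProdRange 2 k :: pvTD k (n % pvProdRange 2 k)

-- pad (least-significant-first) digit list with zeros at the top, to length k
def pvPad (k : Nat) (l : List Int) : List Int := l ++ List.replicate (k - l.length) 0

-- B's loop with its canonical (always sufficient) fuel
def pvAlt (n j : Int) : List Int := from_natural_alt_loop (n.toNat + 1) n j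

theorem pvProdRange_pos : ∀ (k : Nat) (j : Int), 1 ≤ j → 0 < pvProdRange j k := by
  intro k
  induction k with
  | zero => intro j hj; simp [pvProdRange]
  | succ k ih =>
    intro j hj
    have := ih (j + 1) (by omega)
    simp only [pvProdRange]
    positivity

theorem pvProdRange_succ_right : ∀ (k : Nat) (j : Int),
    pvProdRange j (k + 1) = pvProdRange j k * (j + k) := by
  intro k
  induction k with
  | zero => intro j; simp [pvProdRange]
  | succ k ih =>
    intro j
    show j * pvProdRange (j + 1) (k + 1) = j * pvProdRange (j + 1) k * (j + (k + 1))
    rw [ih (j + 1)]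
    ring

theorem alt_fuel_stable : ∀ (F F' : Nat) (n j : Int), 2 ≤ j → n.toNat < F → n.toNat < F' →
    from_natural_alt_loop F n j = from_natural_alt_loop F' n j := by
  intro F
  induction F with
  | zero => intro F' n j _ h; omega
  | succ F ih =>
    intro F' n j hj hF hF'
    cases F' with
    | zero => omega
    | succ F'' =>
      simp only [from_natural_alt_loop]
      by_cases h : 0 < n
      · rw [if_pos h, if_pos h]
        have hdd : PySem.Int.floordiv n j = n / j := PySem.Int.floordiv_eq_ediv_of_pos (by omega)
        have hlt : n / j < n := by
          rw [Int.ediv_lt_iff_lt_mul (by omega)]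
          nlinarith
        have hnn : 0 ≤ n / j := Int.ediv_nonneg (by omega) (by omega)
        rw [hdd, ih F'' (n / j) (j + 1) (by omega) (by omega) (by omega)]
      · rw [if_neg h, if_neg h]

theorem pvAlt_unfold (n j : Int) (hj : 2 ≤ j) :
    pvAlt n j = if 0 < n then PySem.Int.mod n j :: pvAlt (PySem.Int.floordiv n j) (j + 1)
      else [] := by
  show from_natural_alt_loop (n.toNat + 1) n j = _
  simp only [from_natural_alt_loop]
  by_cases h : 0 < n
  · rw [if_pos h, if_pos h]
    have hdd : PySem.Int.floordiv n j = n / j := PySem.Int.floordiv_eq_ediv_of_pos (by omega)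
    have hlt : n / j < n := by
      rw [Int.ediv_lt_iff_lt_mul (by omega)]
      nlinarith
    have hnn : 0 ≤ n / j := Int.ediv_nonneg (by omega) (by omega)
    rw [hdd]
    exact congrArg _ (alt_fuel_stable n.toNat ((n / j).toNat + 1) (n / j) (j + 1)
      (by omega) (by omega) (by omega))
  · rw [if_neg h, if_neg h]

theorem loop1_spec_aux : ∀ (N : Nat) (natural i fac : Int), 1 ≤ i → 1 ≤ fac →
    (natural + 1 - fac).toNat ≤ N →
    ∃ k : Nat, from_natural_loop1 N natural i fac = (i + k, fac * pvProdRange (i + 1) k)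
      ∧ natural < fac * pvProdRange (i + 1) k
      ∧ (∀ k', k = k' + 1 → fac * pvProdRange (i + 1) k' ≤ natural) := by
  intro N
  induction N with
  | zero =>
    intro natural i fac hi hfac hN
    refine ⟨0, by simp [from_natural_loop1, pvProdRange], by simp [pvProdRange]; omega,
      fun k' hk' => by cases hk'⟩
  | succ N ihN =>
    intro natural i fac hi hfac hN
    by_cases h : fac ≤ natural
    · have hmul : fac + fac ≤ fac * (i + 1) := by nlinarith
      obtain ⟨k, heq, hlt, hprev⟩ :=
        ihN natural (i + 1) (fac * (i + 1)) (by omega) (by nlinarith) (by omega)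
      refine ⟨k + 1, ?_, ?_, ?_⟩
      · rw [from_natural_loop1, if_pos h, heq]
        have h1 : i + 1 + (k : Int) = i + ((k + 1 : Nat) : Int) := by push_cast; ring
        have h2 : fac * (i + 1) * pvProdRange (i + 1 + 1) k = fac * pvProdRange (i + 1) (k + 1) := by
          rw [show pvProdRange (i + 1) (k + 1) = (i + 1) * pvProdRange (i + 1 + 1) k from rfl]
          ring
        rw [h1, h2]
      · calc natural < fac * (i + 1) * pvProdRange (i + 1 + 1) k := hlt
          _ = fac * ((i + 1) * pvProdRange (i + 1 + 1) k) := by ring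
          _ = fac * pvProdRange (i + 1) (k + 1) := rfl
      · intro k' hk'
        cases k with
        | zero =>
          cases hk'
          simpa [pvProdRange] using h
        | succ k'' =>
          cases hk'
          calc fac * pvProdRange (i + 1) (k'' + 1)
              = fac * (i + 1) * pvProdRange (i + 1 + 1) k'' := by
                rw [show pvProdRange (i + 1) (k'' + 1) = (i + 1) * pvProdRange (i + 1 + 1) k'' from rfl]
                ring
            _ ≤ natural := hprev k'' rfl
    · rw [from_natural_loop1, if_neg h]
      refine ⟨0, by simp [pvProdRange], by simp [pvProdRange]; omega, fun k' hk' => by cases hk'⟩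

theorem loop2_eq_TD : ∀ (k : Nat) (n : Int), 0 ≤ n →
    from_natural_loop2 (k + 1) ((k : Int) + 1) (pvProdRange 2 k) n = pvTD (k + 1) n := by
  intro k
  induction k with
  | zero =>
    intro n hn
    rw [from_natural_loop2, if_pos (by omega), from_natural_loop2]
    simp [pvProdRange, pvTD]
  | succ k ih =>
    intro n hn
    have hP : 0 < pvProdRange 2 (k + 1) := pvProdRange_pos _ 2 (by omega)
    have hP' : 0 < pvProdRange 2 k := pvProdRange_pos _ 2 (by omega)
    rw [from_natural_loop2, if_pos (by push_cast; omega)]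
    push_cast
    have hfac : PySem.Int.floordiv (pvProdRange 2 (k + 1)) ((k : Int) + 1 + 1) = pvProdRange 2 k := by
      rw [PySem.Int.floordiv_eq_ediv_of_pos (by omega)]
      rw [pvProdRange_succ_right]
      have : (2 : Int) + (k : Int) = (k : Int) + 1 + 1 := by omega
      rw [this, Int.mul_ediv_cancel _ (by omega)]
    have harg : (k : Int) + 1 + 1 - 1 = (k : Int) + 1 := by ring
    rw [PySem.Int.mod_eq_emod_of_pos (by omega), harg, hfac,
      ih (n % pvProdRange 2 (k + 1)) (Int.emod_nonneg _ (by omega))]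
    rw [PySem.Int.floordiv_eq_ediv_of_pos (by omega)]
    rfl

theorem alt_len_le : ∀ (k : Nat) (j n : Int), 2 ≤ j → 0 ≤ n → n < pvProdRange j k →
    (pvAlt n j).length ≤ k := by
  intro k
  induction k with
  | zero =>
    intro j n hj hn hlt
    simp only [pvProdRange] at hlt
    rw [pvAlt_unfold _ _ hj, if_neg (by omega)]
    simp
  | succ k ih =>
    intro j n hj hn hlt
    by_cases h : 0 < n
    · rw [pvAlt_unfold _ _ hj, if_pos h]
      simp only [List.length_cons]
      have hdiv : PySem.Int.floordiv n j = n / j := PySem.Int.floordiv_eq_ediv_of_pos (by omega)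
      have hb : n / j < pvProdRange (j + 1) k := by
        rw [Int.ediv_lt_iff_lt_mul (by omega)]
        calc n < pvProdRange j (k + 1) := hlt
          _ = j * pvProdRange (j + 1) k := rfl
          _ = pvProdRange (j + 1) k * j := by ring
      have := ih (j + 1) (n / j) (by omega) (Int.ediv_nonneg hn (by omega)) hb
      rw [hdiv]
      omega
    · rw [pvAlt_unfold _ _ hj, if_neg h]; simp

theorem alt_len_ge : ∀ (k : Nat) (j n : Int), 2 ≤ j → pvProdRange j k ≤ n →
    k + 1 ≤ (pvAlt n j).length := by
  intro k
  induction k with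
  | zero =>
    intro j n hj hge
    simp only [pvProdRange] at hge
    rw [pvAlt_unfold _ _ hj, if_pos (by omega)]
    simp
  | succ k ih =>
    intro j n hj hge
    have hP : 0 < pvProdRange (j + 1) k := pvProdRange_pos _ _ (by omega)
    have hn : 0 < n := by
      have : 0 < pvProdRange j (k + 1) := pvProdRange_pos _ _ (by omega)
      omega
    rw [pvAlt_unfold _ _ hj, if_pos hn]
    simp only [List.length_cons]
    have hdiv : PySem.Int.floordiv n j = n / j := PySem.Int.floordiv_eq_ediv_of_pos (by omega)
    have hb : pvProdRange (j + 1) k ≤ n / j := by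
      rw [Int.le_ediv_iff_mul_le (by omega)]
      calc pvProdRange (j + 1) k * j = j * pvProdRange (j + 1) k := by ring
        _ = pvProdRange j (k + 1) := rfl
        _ ≤ n := hge
    have := ih (j + 1) (n / j) (by omega) hb
    rw [hdiv]
    omega

theorem alt_split : ∀ (k : Nat) (j m d : Int), 2 ≤ j → 0 ≤ m → m < pvProdRange j k →
    1 ≤ d → d < j + k →
    pvAlt (m + d * pvProdRange j k) j = pvPad k (pvAlt m j) ++ [d] := by
  intro k
  induction k with
  | zero =>
    intro j m d hj hm hmlt hd hdlt
    simp only [pvProdRange] at hmlt hdlt ⊢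
    have hm0 : m = 0 := by omega
    subst hm0
    rw [pvAlt_unfold _ _ hj, if_pos (by omega)]
    rw [PySem.Int.mod_eq_emod_of_pos (by omega), PySem.Int.floordiv_eq_ediv_of_pos (by omega)]
    have h1 : (0 + d * 1) % j = d := by rw [Int.emod_eq_of_lt (by omega) (by omega)]; ring_nf
    have h2 : (0 + d * 1) / j = 0 := by rw [Int.ediv_eq_zero_of_lt (by omega) (by omega)]
    rw [h1, h2, pvAlt_unfold _ _ (by omega), if_neg (by omega)]
    conv_rhs => rw [pvAlt_unfold _ _ hj, if_neg (by omega)]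
    simp [pvPad]
  | succ k ih =>
    intro j m d hj hm hmlt hd hdlt
    have hP : 0 < pvProdRange (j + 1) k := pvProdRange_pos _ _ (by omega)
    set P := pvProdRange (j + 1) k with hPdef
    have hexp : pvProdRange j (k + 1) = j * P := rfl
    have hn : 0 < m + d * pvProdRange j (k + 1) := by
      have : 0 < pvProdRange j (k + 1) := pvProdRange_pos _ _ (by omega)
      nlinarith
    rw [pvAlt_unfold _ _ hj, if_pos hn]
    rw [PySem.Int.mod_eq_emod_of_pos (by omega), PySem.Int.floordiv_eq_ediv_of_pos (by omega)]
    have hmod : (m + d * pvProdRange j (k + 1)) % j = m % j := by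
      rw [hexp]
      have h' : m + d * (j * P) = m + d * P * j := by ring
      rw [h', Int.add_mul_emod_self_right]
    have hdivq : (m + d * pvProdRange j (k + 1)) / j = m / j + d * P := by
      rw [hexp]
      have : m + d * (j * P) = m + d * P * j := by ring
      rw [this, Int.add_mul_ediv_right _ _ (by omega : (j:Int) ≠ 0)]
    have hmj : m / j < P := by
      rw [Int.ediv_lt_iff_lt_mul (by omega)]
      calc m < pvProdRange j (k + 1) := hmlt
        _ = j * P := hexp
        _ = P * j := by ring
    have hih := ih (j + 1) (m / j) d (by omega) (Int.ediv_nonneg hm (by omega)) hmj hd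
      (by push_cast at hdlt ⊢; omega)
    rw [hmod, hdivq, hih]
    -- now handle the right-hand side
    by_cases hm0 : 0 < m
    · conv_rhs => rw [pvAlt_unfold _ _ hj, if_pos hm0]
      rw [PySem.Int.mod_eq_emod_of_pos (by omega : (0:Int) < j),
        PySem.Int.floordiv_eq_ediv_of_pos (by omega : (0:Int) < j)]
      simp only [pvPad, List.length_cons]
      have : k + 1 - ((pvAlt (m / j) (j + 1)).length + 1)
          = k - (pvAlt (m / j) (j + 1)).length := by omega
      simp [this]
    · have hm0' : m = 0 := by omega
      subst hm0'
      have hz : (0:Int) / j = 0 := by simp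
      conv_rhs => rw [pvAlt_unfold _ _ hj, if_neg (by omega)]
      rw [hz]
      rw [pvAlt_unfold _ _ (by omega), if_neg (by omega)]
      simp [pvPad, List.replicate_succ]

theorem TD_eq_rev : ∀ (k : Nat) (n : Int), 0 ≤ n → n < pvProdRange 2 k →
    pvTD k n = (pvPad k (pvAlt n 2)).reverse := by
  intro k
  induction k with
  | zero =>
    intro n hn hlt
    simp only [pvProdRange] at hlt
    rw [pvAlt_unfold _ _ (by omega), if_neg (by omega)]
    simp [pvTD, pvPad]
  | succ k ih =>
    intro n hn hlt
    have hP : 0 < pvProdRange 2 k := pvProdRange_pos _ _ (by omega)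
    set P := pvProdRange 2 k with hPdef
    have hsucc : pvProdRange 2 (k + 1) = P * (2 + k) := pvProdRange_succ_right k 2
    set d := n / P with hd
    set m := n % P with hm
    have hmP : m < P := Int.emod_lt_of_pos n hP
    have hm0 : 0 ≤ m := Int.emod_nonneg n (by omega)
    have hd0 : 0 ≤ d := Int.ediv_nonneg hn (by omega)
    have hdlt : d < 2 + k := by
      rw [hd, Int.ediv_lt_iff_lt_mul hP]
      calc n < pvProdRange 2 (k + 1) := hlt
        _ = P * (2 + k) := hsucc
        _ = (2 + (k:Int)) * P := by ring
    have hsplit : n = m + d * P := by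
      have hdm := Int.mul_ediv_add_emod n P
      rw [hd, hm]; linarith
    show d :: pvTD k m = _
    by_cases hd1 : 1 ≤ d
    · rw [hsplit, alt_split k 2 m d (by omega) hm0 hmP hd1 hdlt]
      have hlen : (pvPad k (pvAlt m 2)).length = k := by
        have hle := alt_len_le k 2 m (by omega) hm0 hmP
        simp only [pvPad, List.length_append, List.length_replicate]
        omega
      have hpadnoop : ∀ l : List Int, l.length = k → pvPad (k + 1) (l ++ [d]) = l ++ [d] := by
        intro l hl
        simp [pvPad, hl]
      rw [hpadnoop _ hlen, List.reverse_append]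
      simp only [List.reverse_cons, List.reverse_nil, List.nil_append, List.singleton_append]
      rw [ih m hm0 hmP]
    · have hd0' : d = 0 := by omega
      have hnm : n = m := by rw [hd0'] at hsplit; omega
      have hnP : n < P := by omega
      have hle := alt_len_le k 2 n (by omega) hn hnP
      have hpad : pvPad (k + 1) (pvAlt n 2) = pvPad k (pvAlt n 2) ++ [0] := by
        simp only [pvPad]
        have h1 : k + 1 - (pvAlt n 2).length = (k - (pvAlt n 2).length) + 1 := by omega
        rw [h1, List.replicate_succ', ← List.append_assoc]
      rw [hpad, List.reverse_append]
      simp only [List.reverse_cons, List.reverse_nil, List.nil_append, List.singleton_append]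
      rw [hd0', hnm, ih m hm0 (by omega)]

-- ===== VERDICT (by name: the statement is the Claim_ definition above) =====
theorem from_natural_spec : Claim_equal_from_natural := by
  intro natural _hdom hpre
  have hpre' : (0 : Int) < natural := hpre
  have hn : (0 : Int) ≤ natural := le_of_lt hpre'
  show from_natural natural = from_natural_alt natural
  obtain ⟨k, heq, hlt, hprev⟩ :=
    loop1_spec_aux (natural.toNat + 1) natural 1 1 (by omega) (by omega) (by omega)
  norm_num at heq hlt
  cases k with
  | zero =>
    simp [pvProdRange] at hlt
    omega
  | succ k'' =>
    have hge : pvProdRange 2 k'' ≤ natural := by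
      have := hprev k'' rfl
      norm_num at this
      exact this
    show from_natural_loop2 ((from_natural_loop1 (natural.toNat + 1) natural 1 1).1 - 1).toNat
        ((from_natural_loop1 (natural.toNat + 1) natural 1 1).1 - 1)
        (PySem.Int.floordiv (from_natural_loop1 (natural.toNat + 1) natural 1 1).2
          (from_natural_loop1 (natural.toNat + 1) natural 1 1).1) natural
      = from_natural_alt natural
    rw [heq]
    have hfacdiv : PySem.Int.floordiv (pvProdRange 2 (k'' + 1)) (1 + ((k'' + 1 : Nat) : Int))
        = pvProdRange 2 k'' := by
      rw [PySem.Int.floordiv_eq_ediv_of_pos (by push_cast; omega), pvProdRange_succ_right]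
      rw [show (2 : Int) + (k'' : Int) = 1 + ((k'' + 1 : Nat) : Int) by push_cast; ring]
      exact Int.mul_ediv_cancel _ (by push_cast; omega)
    rw [show (1 : Int) + ((k'' + 1 : Nat) : Int) - 1 = (k'' : Int) + 1 by push_cast; ring,
      show ((k'' : Int) + 1).toNat = k'' + 1 from by omega,
      hfacdiv, loop2_eq_TD k'' natural hn,
      TD_eq_rev (k'' + 1) natural hn hlt]
    have hlen := alt_len_ge k'' 2 natural (by omega) hge
    rw [show pvPad (k'' + 1) (pvAlt natural 2) = pvAlt natural 2 by
      rw [pvPad, show (k'' + 1) - (pvAlt natural 2).length = 0 from by omega,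
        List.replicate_zero, List.append_nil]]
    rfl
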